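-- pv_equiv track=rewrite | github.com/gokarakondaswamy/codemind-python | Wave_array.py | check
-- ===== SOURCE A (Python) =====
-- def check(a,n):
--     ma=a[1]-a[0]
--     for i in range(1,n-1):
--         if ((a[i]>a[i-1] and a[i+1]<a[i])or (a[i]<a[i-1]and a[i+1]>a[i])):
--             ma=max(ma,abs(a[i]-a[i+1]))
--         else:
--             return False
--     return True
-- ===== SOURCE B (Python) =====
-- def check(a, n):
--     if n < 3:
--         return True
--     up = all(a[i] > a[i - 1] if i % 2 == 1 else a[i] < a[i - 1] for i in range(1, n))
--     down = all(a[i] < a[i - 1] if i % 2 == 1 else a[i] > a[i - 1] for i in range(1, n))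
--     return up or down
-- ===== Notes on version B (the rewrite author's own statement) =====
-- stated objective: alternative
-- what changed: B drops A's per-index local-extremum triple test (and its unused running maximum ma) and instead matches the whole prefix against the only two possible global wave shapes, up-down-up... and down-up-down..., by parity of the index, returning whether either pattern fits.
import Mathlib
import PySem

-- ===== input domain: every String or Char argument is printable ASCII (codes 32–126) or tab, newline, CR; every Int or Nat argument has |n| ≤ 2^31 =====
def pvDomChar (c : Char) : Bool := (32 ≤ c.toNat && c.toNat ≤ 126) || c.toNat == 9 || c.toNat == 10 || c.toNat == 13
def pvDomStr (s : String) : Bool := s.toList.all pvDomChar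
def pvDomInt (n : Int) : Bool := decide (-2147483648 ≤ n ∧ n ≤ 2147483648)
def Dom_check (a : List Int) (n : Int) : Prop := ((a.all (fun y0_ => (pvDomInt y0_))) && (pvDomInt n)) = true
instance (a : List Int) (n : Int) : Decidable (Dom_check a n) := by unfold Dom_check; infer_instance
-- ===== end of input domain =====

-- B replaces A's per-index local-extremum triple test (with its unused running max ma) by matching
-- the prefix against the two possible global wave shapes by index parity; alternative decomposition, same cost.


-- ===== PORT A =====
-- loop 'for i in range(1, n-1)' with early 'return False' (lazy, as Python's for is); carries ma
-- even though it never affects the result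
def checkGo (a : List Int) (n : Int) (ma : Int) (i : Int) : Bool :=
  if h : i < n - 1 then
    if (decide (PySem.List.pyGetD a i 0 > PySem.List.pyGetD a (i-1) 0) &&
        decide (PySem.List.pyGetD a (i+1) 0 < PySem.List.pyGetD a i 0)) ||
       (decide (PySem.List.pyGetD a i 0 < PySem.List.pyGetD a (i-1) 0) &&
        decide (PySem.List.pyGetD a (i+1) 0 > PySem.List.pyGetD a i 0)) then
      checkGo a n (max ma |PySem.List.pyGetD a i 0 - PySem.List.pyGetD a (i+1) 0|) (i+1)
    else
      false
  else true
termination_by (n - 1 - i).toNat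
decreasing_by omega

def check (a : List Int) (n : Int) : Bool :=
  let ma := PySem.List.pyGetD a 1 0 - PySem.List.pyGetD a 0 0
  checkGo a n ma 1

-- ===== PORT B =====
-- 'all(... for i in range(1, n))' of the up-down pattern: lazy scan with early exit, as all() is
def upGo (a : List Int) (n : Int) (i : Int) : Bool :=
  if h : i < n then
    if (if i % 2 == 1 then decide (PySem.List.pyGetD a i 0 > PySem.List.pyGetD a (i-1) 0)
        else decide (PySem.List.pyGetD a i 0 < PySem.List.pyGetD a (i-1) 0)) then
      upGo a n (i+1)
    else false
  else true
termination_by (n - i).toNat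
decreasing_by omega

-- the mirrored down-up pattern scan
def downGo (a : List Int) (n : Int) (i : Int) : Bool :=
  if h : i < n then
    if (if i % 2 == 1 then decide (PySem.List.pyGetD a i 0 < PySem.List.pyGetD a (i-1) 0)
        else decide (PySem.List.pyGetD a i 0 > PySem.List.pyGetD a (i-1) 0)) then
      downGo a n (i+1)
    else false
  else true
termination_by (n - i).toNat
decreasing_by omega

def check_alt (a : List Int) (n : Int) : Bool :=
  if n < 3 then true
  else
    let up := upGo a n 1
    let down := downGo a n 1
    up || down

-- ===== PRECONDITION & SPEC =====
-- Pre_ is exactly the set of inputs on which Python A returns: it excludes lists shorter than 2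
-- (A's unconditional a[1]-a[0] raises IndexError) and, when n > len(a), the arrays A scans off the
-- end of and raises IndexError on — those with no failing interior triple, except the equal-pair
-- length-2 arrays, where A returns False before touching a[2].
def Pre_check (a : List Int) (n : Int) : Prop :=
  2 ≤ a.length ∧
  (n ≤ (a.length : Int) ∨
   (∃ i ∈ List.range a.length, 1 ≤ i ∧ i + 1 < a.length ∧
      ¬((a.getD (i-1) 0 < a.getD i 0 ∧ a.getD (i+1) 0 < a.getD i 0) ∨
        (a.getD i 0 < a.getD (i-1) 0 ∧ a.getD i 0 < a.getD (i+1) 0))) ∨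
   (a.length = 2 ∧ a.getD 0 0 = a.getD 1 0))
instance (a : List Int) (n : Int) : Decidable (Pre_check a n) := by unfold Pre_check; infer_instance
def pvWitness_check : List Int × Int := ([1, 3, 2, 4], 4)

def Spec_check (a : List Int) (n : Int) (out : Bool) : Prop := out = check_alt a n
instance (a : List Int) (n : Int) (out : Bool) : Decidable (Spec_check a n out) := by unfold Spec_check; infer_instance

-- ===== CLAIM (what is proved, stated in full; the proofs are below) =====
def Claim_equal_check : Prop := ∀ (a : List Int) (n : Int), Dom_check a n → Pre_check a n → Spec_check a n (check a n)

-- ===== LEMMAS AND PROOFS =====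

-- the boolean local-extremum test at index i, as A's loop body evaluates it
def condA (a : List Int) (i : Int) : Bool :=
  (decide (PySem.List.pyGetD a i 0 > PySem.List.pyGetD a (i-1) 0) &&
   decide (PySem.List.pyGetD a (i+1) 0 < PySem.List.pyGetD a i 0)) ||
  (decide (PySem.List.pyGetD a i 0 < PySem.List.pyGetD a (i-1) 0) &&
   decide (PySem.List.pyGetD a (i+1) 0 > PySem.List.pyGetD a i 0))

-- the i-th consecutive difference a[i] - a[i-1]
def Df (a : List Int) (i : Int) : Int :=
  PySem.List.pyGetD a i 0 - PySem.List.pyGetD a (i-1) 0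

lemma Df_succ (a : List Int) (i : Int) :
    Df a (i+1) = PySem.List.pyGetD a (i+1) 0 - PySem.List.pyGetD a i 0 := by
  simp [Df]

lemma ite_false_eq_and (b c : Bool) : (if b = true then c else false) = (b && c) := by
  cases b <;> simp

lemma checkGo_eq_all (a : List Int) (n : Int) (ma i : Int) :
    checkGo a n ma i = (PySem.List.pyRange i (n-1) 1).all (condA a) := by
  rw [checkGo]
  by_cases h : i < n - 1
  · rw [dif_pos h, checkGo_eq_all a n _ (i+1), PySem.List.pyRange_one_cons h, List.all_cons]
    simp only [ite_false_eq_and]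
    rfl
  · rw [dif_neg h, PySem.List.pyRange_one_eq_nil (by omega)]
    rfl
termination_by (n - 1 - i).toNat
decreasing_by omega

lemma upGo_eq_all (a : List Int) (n : Int) (i : Int) :
    upGo a n i = (PySem.List.pyRange i n 1).all (fun j =>
      if j % 2 == 1 then decide (PySem.List.pyGetD a j 0 > PySem.List.pyGetD a (j-1) 0)
      else decide (PySem.List.pyGetD a j 0 < PySem.List.pyGetD a (j-1) 0)) := by
  rw [upGo]
  by_cases h : i < n
  · rw [dif_pos h, upGo_eq_all a n (i+1), PySem.List.pyRange_one_cons h, List.all_cons]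
    simp only [ite_false_eq_and]
  · rw [dif_neg h, PySem.List.pyRange_one_eq_nil (by omega)]
    rfl
termination_by (n - i).toNat
decreasing_by omega

lemma downGo_eq_all (a : List Int) (n : Int) (i : Int) :
    downGo a n i = (PySem.List.pyRange i n 1).all (fun j =>
      if j % 2 == 1 then decide (PySem.List.pyGetD a j 0 < PySem.List.pyGetD a (j-1) 0)
      else decide (PySem.List.pyGetD a j 0 > PySem.List.pyGetD a (j-1) 0)) := by
  rw [downGo]
  by_cases h : i < n
  · rw [dif_pos h, downGo_eq_all a n (i+1), PySem.List.pyRange_one_cons h, List.all_cons]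
    simp only [ite_false_eq_and]
  · rw [dif_neg h, PySem.List.pyRange_one_eq_nil (by omega)]
    rfl
termination_by (n - i).toNat
decreasing_by omega

lemma condA_iff (a : List Int) (i : Int) :
    condA a i = true ↔ (0 < Df a i ∧ Df a (i+1) < 0) ∨ (Df a i < 0 ∧ 0 < Df a (i+1)) := by
  rw [Df_succ]
  simp only [condA, Df, Bool.or_eq_true, Bool.and_eq_true, decide_eq_true_eq]
  omega

-- propagation of the sign of the first difference along A's alternation condition
lemma alt_aux (a : List Int) (n : Int)
    (h : ∀ i, 1 ≤ i → i < n - 1 →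
      (0 < Df a i ∧ Df a (i+1) < 0) ∨ (Df a i < 0 ∧ 0 < Df a (i+1))) :
    ∀ k : Nat, 1 + (k : Int) < n →
      (0 < Df a 1 → (if (1 + (k : Int)) % 2 = 1 then 0 < Df a (1 + (k : Int)) else Df a (1 + (k : Int)) < 0)) ∧
      (Df a 1 < 0 → (if (1 + (k : Int)) % 2 = 1 then Df a (1 + (k : Int)) < 0 else 0 < Df a (1 + (k : Int)))) := by
  intro k
  induction k with
  | zero =>
    intro _
    constructor <;> intro h1 <;> norm_num <;> exact h1
  | succ k ih =>
    intro hlt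
    have hcast : ((k + 1 : Nat) : Int) = (k : Int) + 1 := by push_cast; ring
    rw [hcast] at hlt ⊢
    have hk : 1 + (k : Int) < n := by omega
    have ihk := ih hk
    have hi := h (1 + (k : Int)) (by omega) (by omega)
    have e : 1 + (k : Int) + 1 = 1 + ((k : Int) + 1) := by ring
    rw [e] at hi
    constructor
    · intro h1
      have hs := ihk.1 h1
      by_cases hp : (1 + (k : Int)) % 2 = 1
      · rw [if_pos hp] at hs
        have hp' : ¬ (1 + ((k : Int) + 1)) % 2 = 1 := by omega
        rw [if_neg hp']
        rcases hi with ⟨_, h2⟩ | ⟨h2, _⟩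
        · exact h2
        · omega
      · rw [if_neg hp] at hs
        have hp' : (1 + ((k : Int) + 1)) % 2 = 1 := by omega
        rw [if_pos hp']
        rcases hi with ⟨h2, _⟩ | ⟨_, h2⟩
        · omega
        · exact h2
    · intro h1
      have hs := ihk.2 h1
      by_cases hp : (1 + (k : Int)) % 2 = 1
      · rw [if_pos hp] at hs
        have hp' : ¬ (1 + ((k : Int) + 1)) % 2 = 1 := by omega
        rw [if_neg hp']
        rcases hi with ⟨h2, _⟩ | ⟨_, h2⟩
        · omega
        · exact h2
      · rw [if_neg hp] at hs
        have hp' : (1 + ((k : Int) + 1)) % 2 = 1 := by omega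
        rw [if_pos hp']
        rcases hi with ⟨_, h2⟩ | ⟨h2, _⟩
        · exact h2
        · omega

-- the main characterisation: A's triple test on all interior indices ↔ one of the two global shapes
lemma alt_iff (a : List Int) (n : Int) (hn : 3 ≤ n) :
    (∀ i, 1 ≤ i → i < n - 1 →
        (0 < Df a i ∧ Df a (i+1) < 0) ∨ (Df a i < 0 ∧ 0 < Df a (i+1)))
    ↔ ((∀ i, 1 ≤ i → i < n → (if i % 2 = 1 then 0 < Df a i else Df a i < 0)) ∨
       (∀ i, 1 ≤ i → i < n → (if i % 2 = 1 then Df a i < 0 else 0 < Df a i))) := by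
  constructor
  · intro h
    have h1 := h 1 (by omega) (by omega)
    have base : 0 < Df a 1 ∨ Df a 1 < 0 := by rcases h1 with ⟨h2, _⟩ | ⟨h2, _⟩ <;> omega
    rcases base with hb | hb
    · left
      intro i hi1 hi2
      have e : i = 1 + ((i - 1).toNat : Int) := by omega
      rw [e]
      exact (alt_aux a n h (i - 1).toNat (by omega)).1 hb
    · right
      intro i hi1 hi2
      have e : i = 1 + ((i - 1).toNat : Int) := by omega
      rw [e]
      exact (alt_aux a n h (i - 1).toNat (by omega)).2 hb
  · intro h i hi1 hi2
    rcases h with h | h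
    · have p1 := h i (by omega) (by omega)
      have p2 := h (i + 1) (by omega) (by omega)
      by_cases hp : i % 2 = 1
      · rw [if_pos hp] at p1
        rw [if_neg (by omega : ¬ (i + 1) % 2 = 1)] at p2
        exact Or.inl ⟨p1, p2⟩
      · rw [if_neg hp] at p1
        rw [if_pos (by omega : (i + 1) % 2 = 1)] at p2
        exact Or.inr ⟨p1, p2⟩
    · have p1 := h i (by omega) (by omega)
      have p2 := h (i + 1) (by omega) (by omega)
      by_cases hp : i % 2 = 1
      · rw [if_pos hp] at p1
        rw [if_neg (by omega : ¬ (i + 1) % 2 = 1)] at p2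
        exact Or.inr ⟨p1, p2⟩
      · rw [if_neg hp] at p1
        rw [if_pos (by omega : (i + 1) % 2 = 1)] at p2
        exact Or.inl ⟨p1, p2⟩

-- ===== VERDICT (by name: the statements are the Claim_ definitions above) =====
theorem check_spec : Claim_equal_check := by
  intro a n _ _
  show check a n = check_alt a n
  unfold check check_alt
  rw [checkGo_eq_all]
  by_cases hn : n < 3
  · rw [PySem.List.pyRange_one_eq_nil (by omega : n - 1 ≤ 1), if_pos hn]
    simp
  · rw [if_neg hn, upGo_eq_all, downGo_eq_all]
    push Not at hn
    rw [Bool.eq_iff_iff]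
    simp only [Bool.or_eq_true, List.all_eq_true, PySem.List.mem_pyRange_one,
      and_imp, beq_iff_eq]
    constructor
    · intro h
      have h' : ∀ i, 1 ≤ i → i < n - 1 →
          (0 < Df a i ∧ Df a (i+1) < 0) ∨ (Df a i < 0 ∧ 0 < Df a (i+1)) := by
        intro i hi1 hi2
        exact (condA_iff a i).mp (h i hi1 hi2)
      rcases (alt_iff a n hn).mp h' with hh | hh
      · left
        intro i hi1 hi2
        have := hh i hi1 hi2
        by_cases hp : i % 2 = 1
        · rw [if_pos hp] at this ⊢; simpa [Df] using this
        · rw [if_neg hp] at this ⊢; simpa [Df] using this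
      · right
        intro i hi1 hi2
        have := hh i hi1 hi2
        by_cases hp : i % 2 = 1
        · rw [if_pos hp] at this ⊢; simpa [Df] using this
        · rw [if_neg hp] at this ⊢; simpa [Df] using this
    · intro h i hi1 hi2
      rw [condA_iff]
      refine (alt_iff a n hn).mpr ?_ i hi1 hi2
      rcases h with h | h
      · left
        intro j hj1 hj2
        have := h j hj1 hj2
        by_cases hp : j % 2 = 1
        · rw [if_pos hp] at this ⊢; simpa [Df] using this
        · rw [if_neg hp] at this ⊢; simpa [Df] using this
      · right
        intro j hj1 hj2
        have := h j hj1 hj2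
        by_cases hp : j % 2 = 1
        · rw [if_pos hp] at this ⊢; simpa [Df] using this
        · rw [if_neg hp] at this ⊢; simpa [Df] using this
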